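-- pv_equiv track=rewrite | github.com/TikiTaka-devTeam/semantic-question-clustering | main2.py | make_new_group_id
-- ===== SOURCE A (Python) =====
-- def make_new_group_id(store, category_id):
--     existing = [
--         item["group_id"] for item in store
--         if item["category_id"] == category_id and item["group_id"].startswith(f"{category_id}_g")
--     ]
--
--     nums = []
--     for gid in existing:
--         try:
--             nums.append(int(gid.split("_g")[-1]))
--         except:
--             pass
--
--     next_num = max(nums, default=0) + 1
--     return f"{category_id}_g{next_num}"
-- ===== SOURCE B (Python) =====
-- def make_new_group_id(store, category_id):
--     prefix = f"{category_id}_g"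
--
--     def num_of(item):
--         if item["category_id"] == category_id and item["group_id"].startswith(prefix):
--             try:
--                 return int(item["group_id"].split("_g")[-1])
--             except ValueError:
--                 return None
--         return None
--
--     def best(lo, hi):
--         # max suffix number among store[lo:hi], or None if there is none
--         if hi <= lo:
--             return None
--         if hi - lo == 1:
--             return num_of(store[lo])
--         mid = (lo + hi) // 2
--         left = best(lo, mid)
--         right = best(mid, hi)
--         if left is None:
--             return right
--         if right is None:
--             return left
--         return left if left >= right else right
--
--     b = best(0, len(store))
--     return f"{prefix}{(0 if b is None else b) + 1}"
-- ===== Notes on version B (the rewrite author's own statement) =====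
-- stated objective: alternative
-- what changed: Replaces A's two staged list-building passes plus max() with a recursive divide-and-conquer over store index ranges: each half computes its own best suffix number (None if none) and the halves are combined, so no intermediate list is ever built and the traversal is a balanced tree rather than a linear scan.
import Mathlib
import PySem

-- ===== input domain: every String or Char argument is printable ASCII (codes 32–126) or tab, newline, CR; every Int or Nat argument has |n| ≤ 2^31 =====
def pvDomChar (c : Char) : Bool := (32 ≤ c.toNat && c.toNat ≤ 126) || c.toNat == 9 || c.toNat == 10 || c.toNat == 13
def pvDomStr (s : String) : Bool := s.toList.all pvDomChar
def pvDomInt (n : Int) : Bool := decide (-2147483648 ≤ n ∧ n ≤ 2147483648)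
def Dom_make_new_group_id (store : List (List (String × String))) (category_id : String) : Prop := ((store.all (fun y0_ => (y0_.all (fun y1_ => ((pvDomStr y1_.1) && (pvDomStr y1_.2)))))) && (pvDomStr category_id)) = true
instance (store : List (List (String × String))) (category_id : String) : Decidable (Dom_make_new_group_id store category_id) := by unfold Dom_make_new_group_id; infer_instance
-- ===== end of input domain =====

-- B replaces A's two staged list-building passes plus max() by a recursive divide-and-conquer over
-- index ranges of store (combine the best suffix number of each half); objective: alternative.

-- ===== PORT A =====
def make_new_group_id (store : List (List (String × String))) (category_id : String) : String :=
  let pref := PySem.Str.join "" [category_id, "_g"]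
  let existing : List String :=
    (store.filter (fun item =>
        (PySem.Dict.getD (PySem.Dict.mk item) "category_id" "") == category_id &&
        PySem.Str.startswith (PySem.Dict.getD (PySem.Dict.mk item) "group_id" "") pref)).map
      (fun item => PySem.Dict.getD (PySem.Dict.mk item) "group_id" "")
  let nums : List Int := existing.foldl (fun acc gid =>
      match PySem.List.pyGet? ((PySem.Str.split? gid "_g").getD []) (-1) with
      | some piece =>
          match PySem.Int.ofStr? piece with
          | some n => acc ++ [n]     -- nums.append(int(...))
          | none => acc              -- except: pass
      | none => acc) []              -- (IndexError would also be swallowed by the bare except)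
  let next_num := PySem.List.maxD nums (fun x => x) 0 + 1
  PySem.Str.join "" [category_id, "_g", PySem.Int.toStr next_num]

-- ===== PORT B =====
-- num_of(item): the parsed suffix number of a matching item, or None
def pvNumOfB (category_id : String) (item : List (String × String)) : Option Int :=
  if ((PySem.Dict.getD (PySem.Dict.mk item) "category_id" "") == category_id &&
      PySem.Str.startswith (PySem.Dict.getD (PySem.Dict.mk item) "group_id" "")
        (PySem.Str.join "" [category_id, "_g"])) then
    -- try: int(item["group_id"].split("_g")[-1]) except ValueError: None
    -- ([-1] on the nonempty split result never raises; the total getD "" rendering is exact there)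
    PySem.Int.ofStr? ((PySem.List.pyGet?
      ((PySem.Str.split? (PySem.Dict.getD (PySem.Dict.mk item) "group_id" "") "_g").getD []) (-1)).getD "")
  else none

-- best(lo, hi): max suffix number among store[lo:hi], or None (divide and conquer)
-- (store[lo] is only reached with 0 ≤ lo < len(store), where the total getD [] rendering is exact)
def pvBest (store : List (List (String × String))) (category_id : String) (lo hi : Int) : Option Int :=
  if hi ≤ lo then none
  else if hi - lo = 1 then pvNumOfB category_id ((PySem.List.pyGet? store lo).getD [])
  else
    let mid := PySem.Int.floordiv (lo + hi) 2
    let left := pvBest store category_id lo mid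
    let right := pvBest store category_id mid hi
    match left, right with
    | none, r => r
    | some a, none => some a
    | some a, some b => if a ≥ b then some a else some b
termination_by (hi - lo).toNat
decreasing_by
  all_goals
    have h2 : PySem.Int.floordiv (lo + hi) 2 = (lo + hi) / 2 :=
      PySem.Int.floordiv_eq_ediv_of_pos (by omega)
    omega

def make_new_group_id_alt (store : List (List (String × String))) (category_id : String) : String :=
  let b := pvBest store category_id 0 (store.length : Int)
  PySem.Str.join "" [category_id, "_g",
    PySem.Int.toStr ((match b with | none => 0 | some v => v) + 1)]

-- ===== PRECONDITION & SPEC =====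
-- Pre_ excludes exactly the stores on which Python A raises KeyError: an item without the key
-- "category_id", or an item matching category_id without the key "group_id".
def Pre_make_new_group_id (store : List (List (String × String))) (category_id : String) : Prop :=
  ∀ item ∈ store,
    (PySem.Dict.get? (PySem.Dict.mk item) "category_id").isSome = true ∧
    (PySem.Dict.get? (PySem.Dict.mk item) "category_id" = some category_id →
      (PySem.Dict.get? (PySem.Dict.mk item) "group_id").isSome = true)
instance (store : List (List (String × String))) (category_id : String) : Decidable (Pre_make_new_group_id store category_id) := by unfold Pre_make_new_group_id; infer_instance

def pvWitness_make_new_group_id : (List (List (String × String))) × String :=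
  ([[("category_id", "c"), ("group_id", "c_g1")], [("category_id", "d"), ("group_id", "d_g2")]], "c")

def Spec_make_new_group_id (store : List (List (String × String))) (category_id : String) (out : String) : Prop := out = make_new_group_id_alt store category_id
instance (store : List (List (String × String))) (category_id : String) (out : String) : Decidable (Spec_make_new_group_id store category_id out) := by unfold Spec_make_new_group_id; infer_instance

-- ===== CLAIM (what is proved, stated in full; the proofs are below) =====
def Claim_equal_make_new_group_id : Prop := ∀ (store : List (List (String × String))) (category_id : String), Dom_make_new_group_id store category_id → Pre_make_new_group_id store category_id → Spec_make_new_group_id store category_id (make_new_group_id store category_id)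

-- ===== LEMMAS AND PROOFS =====

-- shared per-item pieces, only used by the proofs below
def pvGid (item : List (String × String)) : String :=
  PySem.Dict.getD (PySem.Dict.mk item) "group_id" ""

def pvCond (category_id : String) (item : List (String × String)) : Bool :=
  (PySem.Dict.getD (PySem.Dict.mk item) "category_id" "") == category_id &&
  PySem.Str.startswith (pvGid item) (PySem.Str.join "" [category_id, "_g"])

def pvParse (gid : String) : Option Int :=
  match PySem.List.pyGet? ((PySem.Str.split? gid "_g").getD []) (-1) with
  | some piece => PySem.Int.ofStr? piece
  | none => none

def pvG (category_id : String) (item : List (String × String)) : Option Int :=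
  if pvCond category_id item then pvParse (pvGid item) else none

def pvMStep (acc : Option Int) (n : Int) : Option Int :=
  match acc with
  | none => some n
  | some b => if n > b then some n else some b

-- B's combine step, named
def pvComb (l r : Option Int) : Option Int :=
  match l, r with
  | none, r => r
  | some a, none => some a
  | some a, some b => if a ≥ b then some a else some b

-- the running max of the parsed numbers of a segment (the quantity pvBest computes)
def pvM (category_id : String) (l : List (List (String × String))) : Option Int :=
  (l.filterMap (pvG category_id)).foldl pvMStep none

-- A's loop body, named so the lemmas can talk about it (definitionally the port lambda)
def pvStepA (acc : List Int) (gid : String) : List Int :=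
  match PySem.List.pyGet? ((PySem.Str.split? gid "_g").getD []) (-1) with
  | some piece =>
      match PySem.Int.ofStr? piece with
      | some n => acc ++ [n]
      | none => acc
  | none => acc

-- A's parsing form equals the total getD-"" form (int("") is a ValueError, i.e. none)
theorem pvParse_eq (gid : String) :
    PySem.Int.ofStr? ((PySem.List.pyGet? ((PySem.Str.split? gid "_g").getD []) (-1)).getD "")
      = pvParse gid := by
  unfold pvParse
  cases h : PySem.List.pyGet? ((PySem.Str.split? gid "_g").getD []) (-1) with
  | none => simp; decide
  | some piece => simp

-- B's num_of is pvG
theorem pvNumOfB_eq (category_id : String) (item : List (String × String)) :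
    pvNumOfB category_id item = pvG category_id item := by
  unfold pvNumOfB pvG pvCond pvGid
  rw [pvParse_eq]

-- A's nums-building loop is init ++ filterMap pvParse
theorem pvNums_eq (l : List String) (init : List Int) :
    l.foldl pvStepA init = init ++ l.filterMap pvParse := by
  induction l generalizing init with
  | nil => simp
  | cons gid t ih =>
      simp only [List.foldl_cons, List.filterMap_cons]
      cases h : PySem.List.pyGet? ((PySem.Str.split? gid "_g").getD []) (-1) with
      | none => simp [ih, pvStepA, pvParse, h]
      | some piece =>
          cases h2 : PySem.Int.ofStr? piece with
          | none => simp [ih, pvStepA, pvParse, h, h2]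
          | some n => simp [ih, pvStepA, pvParse, h, h2]

-- fusing A's filter+map+filterMap into one filterMap over store
theorem pvFilterMap_eq (store : List (List (String × String))) (category_id : String) :
    ((store.filter (pvCond category_id)).map pvGid).filterMap pvParse
      = store.filterMap (pvG category_id) := by
  induction store with
  | nil => rfl
  | cons item t ih =>
      by_cases h : pvCond category_id item = true
      · simp [h, List.filterMap_cons, pvG, ih]
      · simp [h, pvG, ih]

theorem pvMStep_some (b n : Int) : pvMStep (some b) n = some (max b n) := by
  show (if n > b then some n else some b) = some (max b n)
  split_ifs with h1 <;> simp [max_def] <;> omega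

theorem pvComb_some (a b : Int) : pvComb (some a) (some b) = some (max a b) := by
  show (if a ≥ b then some a else some b) = some (max a b)
  split_ifs with h1 <;> simp [max_def] <;> omega

-- running the max-fold from any accumulator is combining with the fold from none
theorem pvFold_comb (y : List Int) : ∀ acc, y.foldl pvMStep acc = pvComb acc (y.foldl pvMStep none) := by
  induction y with
  | nil => intro acc; cases acc <;> rfl
  | cons z t ih =>
      intro acc
      simp only [List.foldl_cons]
      rw [ih (pvMStep acc z), ih (pvMStep none z)]
      cases acc with
      | none => rfl
      | some a =>
          rw [show pvMStep none z = some z from rfl, pvMStep_some]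
          cases h : t.foldl pvMStep none with
          | none =>
              show some (max a z) = pvComb (some a) (some z)
              rw [pvComb_some]
          | some w =>
              rw [pvComb_some, pvComb_some, pvComb_some, max_assoc]

-- the segment quantity combines over append
theorem pvM_append (category_id : String) (x y : List (List (String × String))) :
    pvM category_id (x ++ y) = pvComb (pvM category_id x) (pvM category_id y) := by
  unfold pvM
  rw [List.filterMap_append, List.foldl_append, pvFold_comb]

theorem pvM_singleton (category_id : String) (item : List (String × String)) :
    pvM category_id [item] = pvG category_id item := by
  unfold pvM
  cases h : pvG category_id item with
  | none => simp [h]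
  | some v =>
      simp [h]
      rfl

-- the divide-and-conquer recursion computes the segment quantity
theorem pvBest_eq (store : List (List (String × String))) (category_id : String) :
    ∀ (n : Nat) (lo hi : Int), (hi - lo).toNat = n → 0 ≤ lo → lo ≤ hi → hi ≤ store.length →
      pvBest store category_id lo hi
        = pvM category_id ((store.drop lo.toNat).take (hi - lo).toNat) := by
  intro n
  induction n using Nat.strong_induction_on with
  | _ n ih =>
    intro lo hi hn h0 hlh hhl
    unfold pvBest
    by_cases hle : hi ≤ lo
    · rw [if_pos hle]
      have : (hi - lo).toNat = 0 := by omega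
      rw [this]
      rfl
    · rw [if_neg hle]
      by_cases h1 : hi - lo = 1
      · rw [if_pos h1, h1]
        have hlt : lo.toNat < store.length := by omega
        have hseg : (store.drop lo.toNat).take (1 : Int).toNat = [store[lo.toNat]] := by
          rw [List.drop_eq_getElem_cons hlt]
          rfl
        rw [hseg, pvM_singleton, pvNumOfB_eq]
        have : (PySem.List.pyGet? store lo).getD [] = store[lo.toNat] := by
          unfold PySem.List.pyGet? PySem.List.pyIdx?
          rw [if_pos h0, if_pos (by omega : lo < (store.length : Int))]
          simp [List.getElem?_eq_getElem hlt]
        rw [this]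
      · rw [if_neg h1]
        show (match pvBest store category_id lo (PySem.Int.floordiv (lo + hi) 2),
                   pvBest store category_id (PySem.Int.floordiv (lo + hi) 2) hi with
              | none, r => r
              | some a, none => some a
              | some a, some b => if a ≥ b then some a else some b)
            = pvM category_id ((store.drop lo.toNat).take (hi - lo).toNat)
        have hm : PySem.Int.floordiv (lo + hi) 2 = (lo + hi) / 2 :=
          PySem.Int.floordiv_eq_ediv_of_pos (by omega)
        rw [ih ((PySem.Int.floordiv (lo + hi) 2) - lo).toNat (by omega) lo _ rfl h0 (by omega) (by omega),
            ih (hi - (PySem.Int.floordiv (lo + hi) 2)).toNat (by omega) _ hi rfl (by omega) (by omega) hhl]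
        have hsplit : (store.drop lo.toNat).take (hi - lo).toNat
            = (store.drop lo.toNat).take ((PySem.Int.floordiv (lo + hi) 2) - lo).toNat
              ++ (store.drop (PySem.Int.floordiv (lo + hi) 2).toNat).take (hi - (PySem.Int.floordiv (lo + hi) 2)).toNat := by
          have hsum : (hi - lo).toNat
              = ((PySem.Int.floordiv (lo + hi) 2) - lo).toNat + (hi - (PySem.Int.floordiv (lo + hi) 2)).toNat := by omega
          rw [hsum, List.take_add, List.drop_drop]
          have : lo.toNat + ((PySem.Int.floordiv (lo + hi) 2) - lo).toNat = (PySem.Int.floordiv (lo + hi) 2).toNat := by omega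
          rw [this]
        rw [hsplit, pvM_append]
        rfl

-- the running max as A reads it (maxD + 1) and as B's final match reads it agree
theorem pvMax_eq (l : List Int) :
    PySem.List.maxD l (fun x => x) 0 + 1
      = (match l.foldl pvMStep none with | none => (0 : Int) | some b => b) + 1 := by
  cases l with
  | nil => rfl
  | cons x t =>
      show (PySem.List.max? (x :: t) (fun y => y)).getD 0 + 1
          = (match (x :: t).foldl pvMStep none with | none => (0 : Int) | some b => b) + 1
      rw [PySem.List.max?_id_cons, List.foldl_cons,
        show pvMStep none x = some x from rfl]
      have : t.foldl pvMStep (some x) = some (t.foldl max x) := by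
        induction t generalizing x with
        | nil => rfl
        | cons y t ih =>
            simp only [List.foldl_cons]
            rw [pvMStep_some]
            exact ih (max x y)
      rw [this]
      rfl

theorem pv_main (store : List (List (String × String))) (category_id : String) :
    make_new_group_id store category_id = make_new_group_id_alt store category_id := by
  show PySem.Str.join "" [category_id, "_g",
        PySem.Int.toStr (PySem.List.maxD
          (((store.filter (pvCond category_id)).map pvGid).foldl pvStepA []) (fun x => x) 0 + 1)]
      = PySem.Str.join "" [category_id, "_g",
        PySem.Int.toStr ((match pvBest store category_id 0 (store.length : Int) with
          | none => (0 : Int) | some v => v) + 1)]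
  rw [pvNums_eq, List.nil_append, pvFilterMap_eq,
      pvBest_eq store category_id store.length 0 (store.length : Int)
        (by omega) (by omega) (by omega) (by omega)]
  have hfull : (store.drop (0 : Int).toNat).take ((store.length : Int) - 0).toNat = store := by
    simp
  rw [hfull, pvMax_eq]
  rfl

-- ===== VERDICT (by name: the statement is the Claim_ definition above) =====
theorem make_new_group_id_spec : Claim_equal_make_new_group_id := by
  intro store category_id _ _
  unfold Spec_make_new_group_id
  exact pv_main store category_id
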